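-- pv_equiv track=rewrite | github.com/Sametbl/AVR_LAB | LAB_1/LAB_1_2/Experiment_2/Delay/Adjustable_delay/Find_A_B_C_by_brute_force.py | find_best_abc
-- ===== SOURCE A (Python) =====
-- def find_best_abc(target_cycles):
--     best_A = None
--     best_B = None
--     best_C = None
--     min_error = float('inf')
--
--     # Loop over all possible values of A, B, C (from 1 to 255)
--     for A in range(0, 256):
--         for B in range(0, 256):
--             for C in range(0, 256):
--                 total_cycles = 3*A*B*C + 3*B*C + 3*C + 6      # The total cycles
--                 error = abs(total_cycles - target_cycles)     # The error between the total cycles and the target cycles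
--
--                 # If the current error is smaller than the best one, update the best values
--                 if error < min_error:
--                     min_error = error
--                     best_A, best_B, best_C = A, B, C
--
--                 if min_error == 0:                            # Early exit if we find an exact match
--                     break
--
--     return best_A, best_B, best_C, min_error
-- ===== SOURCE B (Python) =====
-- def find_best_abc(target_cycles):
--     # total = 3*A*B*C + 3*B*C + 3*C + 6 = m*C + 6 with m = 3*(A*B + B + 1),
--     # so for each (A, B) the best C is found in O(1) around (target-6)//m.
--     d = target_cycles - 6
--     best = None
--     for A in range(256):
--         for B in range(256):
--             m = 3 * (A * B + B + 1)
--             q = d // m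
--             if q < 0:
--                 c = 0
--             elif q > 254:
--                 c = 255
--             else:
--                 r = d - m * q
--                 c = q if r <= m - r else q + 1
--             e = abs(m * c - d)
--             if best is None or e < best[3]:
--                 best = (A, B, c, e)
--     return best
-- ===== Notes on version B (the rewrite author's own statement) =====
-- stated objective: faster
-- what changed: B factors the cycle count so that the error is V-shaped in C and, for each pair (A,B), picks the optimal C directly by floor division with a midpoint tie test, removing A's innermost scan over C.
import Mathlib
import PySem

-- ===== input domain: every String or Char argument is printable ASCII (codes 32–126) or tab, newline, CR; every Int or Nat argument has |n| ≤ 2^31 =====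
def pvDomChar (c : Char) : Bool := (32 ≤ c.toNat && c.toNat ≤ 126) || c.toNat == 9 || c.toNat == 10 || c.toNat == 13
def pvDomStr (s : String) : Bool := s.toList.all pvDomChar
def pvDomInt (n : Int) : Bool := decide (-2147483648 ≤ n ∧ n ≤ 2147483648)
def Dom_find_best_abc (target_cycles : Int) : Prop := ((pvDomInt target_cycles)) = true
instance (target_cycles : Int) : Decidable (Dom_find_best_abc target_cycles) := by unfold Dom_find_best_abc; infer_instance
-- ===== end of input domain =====

-- B factors the cycle count so the error is V-shaped in C and picks the optimal C per pair (A,B)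
-- directly (floor division + midpoint tie test), removing A's innermost scan over C.


-- state (best_A, best_B, best_C, min_error); `none` = nothing recorded yet
-- (Python's best_A = None / min_error = inf initial state: any error is < inf)

-- return best_A, best_B, best_C, min_error (both ports; `none` never occurs: the loops are nonempty)
def pvOut (st : Option (Int × Int × Int × Int)) : List Int :=
  match st with
  | some (a, b, c, e) => [a, b, c, e]
  | none => []

-- ===== PORT A =====
-- inner `for C in …` loop, with the `if min_error == 0: break` early exit
def pvALoopC (tc A B : Int) : List Int → Option (Int × Int × Int × Int) → Option (Int × Int × Int × Int)
  | [], st => st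
  | C :: rest, st =>
      let total := 3*A*B*C + 3*B*C + 3*C + 6
      let error := |total - tc|
      let st' := if (match st with | none => true | some (_, _, _, me) => decide (error < me)) then
                   some (A, B, C, error) else st
      if (match st' with | none => false | some (_, _, _, me) => me == 0) then st'
      else pvALoopC tc A B rest st'

-- the two outer `for A` / `for B` loops
def pvAFold (target_cycles : Int) : Option (Int × Int × Int × Int) :=
  (PySem.List.pyRange 0 256 1).foldl (fun st A =>
    (PySem.List.pyRange 0 256 1).foldl (fun st B =>
      pvALoopC target_cycles A B (PySem.List.pyRange 0 256 1) st) st) none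

def find_best_abc (target_cycles : Int) : List Int :=
  pvOut (pvAFold target_cycles)

-- ===== PORT B =====
def pvBestC (d m : Int) : Int :=
  let q := PySem.Int.floordiv d m
  if q < 0 then 0
  else if q > 254 then 255
  else
    let r := d - m * q
    if r ≤ m - r then q else q + 1

def pvBStep (d : Int) (st : Option (Int × Int × Int × Int)) (A B : Int) :
    Option (Int × Int × Int × Int) :=
  let m := 3 * (A * B + B + 1)
  let c := pvBestC d m
  let e := |m * c - d|
  if (match st with | none => true | some (_, _, _, me) => decide (e < me)) then
    some (A, B, c, e) else st

def pvBFold (d : Int) : Option (Int × Int × Int × Int) :=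
  (PySem.List.pyRange 0 256 1).foldl (fun st A =>
    (PySem.List.pyRange 0 256 1).foldl (fun st B =>
      pvBStep d st A B) st) none

def find_best_abc_alt (target_cycles : Int) : List Int :=
  pvOut (pvBFold (target_cycles - 6))

-- ===== PRECONDITION & SPEC =====
def Spec_find_best_abc (target_cycles : Int) (out : List Int) : Prop := out = find_best_abc_alt target_cycles
instance (target_cycles : Int) (out : List Int) : Decidable (Spec_find_best_abc target_cycles out) := by unfold Spec_find_best_abc; infer_instance

-- ===== CLAIM (what is proved, stated in full; the proofs are below) =====
def Claim_equal_find_best_abc : Prop := ∀ (target_cycles : Int), Dom_find_best_abc target_cycles → Spec_find_best_abc target_cycles (find_best_abc target_cycles)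

-- ===== LEMMAS AND PROOFS =====

-- `error < min_error` against the optional state
def pvLt (e : Int) (st : Option (Int × Int × Int × Int)) : Bool :=
  match st with | none => true | some (_, _, _, me) => decide (e < me)

-- the inner loop step, without the break
def pvStep (f : Int → Int) (A B : Int) (st : Option (Int × Int × Int × Int)) (C : Int) :
    Option (Int × Int × Int × Int) :=
  if pvLt (f C) st then some (A, B, C, f C) else st

-- first-minimum of f over a list (scanning from the left, ties keep the earlier element)
def pvBestOf (f : Int → Int) : List Int → Option (Int × Int)
  | [] => none
  | C :: cs =>
      match pvBestOf f cs with
      | none => some (C, f C)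
      | some (c, e) => if f C ≤ e then some (C, f C) else some (c, e)

lemma pvFoldl_fix (f : Int → Int) (hf : ∀ x, 0 ≤ f x) (A B a b c : Int) :
    ∀ cs : List Int, cs.foldl (pvStep f A B) (some (a, b, c, 0)) = some (a, b, c, 0) := by
  intro cs
  induction cs with
  | nil => rfl
  | cons C rest ih =>
      have h : pvStep f A B (some (a, b, c, 0)) C = some (a, b, c, 0) := by
        unfold pvStep pvLt
        have := hf C
        simp
        omega
      simp [List.foldl, h, ih]

lemma pvALoopC_eq_foldl (tc A B : Int) :
    ∀ (cs : List Int) (st : Option (Int × Int × Int × Int)),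
      pvALoopC tc A B cs st =
        cs.foldl (pvStep (fun C => |3*A*B*C + 3*B*C + 3*C + 6 - tc|) A B) st := by
  intro cs
  induction cs with
  | nil => intro st; rfl
  | cons C rest ih =>
      intro st
      set f : Int → Int := fun C => |3*A*B*C + 3*B*C + 3*C + 6 - tc| with hfdef
      have hstep : (if (match st with | none => true | some (_, _, _, me) => decide (f C < me)) then
            some (A, B, C, f C) else st) = pvStep f A B st C := by
        unfold pvStep pvLt; rfl
      show (let st' := if (match st with | none => true | some (_, _, _, me) => decide (f C < me)) then
              some (A, B, C, f C) else st
            if (match st' with | none => false | some (_, _, _, me) => me == 0) then st'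
            else pvALoopC tc A B rest st') = _
      rw [hstep]
      by_cases hbrk : (match pvStep f A B st C with | none => false | some (_, _, _, me) => me == 0) = true
      · -- break: min_error = 0, the rest of the scan cannot improve
        simp only [hbrk, if_pos]
        rcases hst' : pvStep f A B st C with _ | ⟨a, b, c, e⟩
        · rw [hst'] at hbrk; simp at hbrk
        · rw [hst'] at hbrk
          have he : e = 0 := by simpa using hbrk
          subst he
          rw [List.foldl_cons, hst', pvFoldl_fix f (fun x => abs_nonneg _) A B]
      · simp only [hbrk, if_neg, Bool.not_eq_true] at *
        rw [ih, List.foldl_cons]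

lemma pvBestOf_cons_none (f : Int → Int) (C : Int) (cs : List Int)
    (h : pvBestOf f cs = none) : pvBestOf f (C :: cs) = some (C, f C) := by
  simp [pvBestOf, h]

lemma pvBestOf_cons_some (f : Int → Int) (C : Int) (cs : List Int) (c e : Int)
    (h : pvBestOf f cs = some (c, e)) :
    pvBestOf f (C :: cs) = if f C ≤ e then some (C, f C) else some (c, e) := by
  simp only [pvBestOf, h]

lemma pvBestOf_mem (f : Int → Int) :
    ∀ (cs : List Int) (c e : Int), pvBestOf f cs = some (c, e) → c ∈ cs ∧ e = f c := by
  intro cs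
  induction cs with
  | nil => intro c e h; simp [pvBestOf] at h
  | cons C rest ih =>
      intro c e h
      rcases hrest : pvBestOf f rest with _ | ⟨c', e'⟩
      · rw [pvBestOf_cons_none f C rest hrest] at h
        simp at h; obtain ⟨h1, h2⟩ := h; subst h1; subst h2
        exact ⟨List.mem_cons_self, rfl⟩
      · rw [pvBestOf_cons_some f C rest c' e' hrest] at h
        by_cases hle : f C ≤ e'
        · rw [if_pos hle] at h; simp at h
          obtain ⟨h1, h2⟩ := h; subst h1; subst h2
          exact ⟨List.mem_cons_self, rfl⟩
        · rw [if_neg hle] at h; simp at h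
          obtain ⟨hm, he⟩ := ih c' e' hrest
          obtain ⟨h1, h2⟩ := h; subst h1; subst h2
          exact ⟨List.mem_cons_of_mem _ hm, he⟩

-- fold the running best (and its bookkeeping) into one combining function
def pvCombine (A B : Int) (st : Option (Int × Int × Int × Int)) :
    Option (Int × Int) → Option (Int × Int × Int × Int)
  | none => st
  | some (c, e) => if pvLt e st then some (A, B, c, e) else st

lemma pvFoldl_step_eq_bestOf (f : Int → Int) (A B : Int) :
    ∀ (cs : List Int) (st : Option (Int × Int × Int × Int)),
      cs.foldl (pvStep f A B) st = pvCombine A B st (pvBestOf f cs) := by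
  intro cs
  induction cs with
  | nil => intro st; rfl
  | cons C rest ih =>
      intro st
      rw [List.foldl_cons, ih]
      rcases hrest : pvBestOf f rest with _ | ⟨c, e⟩
      · rw [pvBestOf_cons_none f C rest hrest]
        show pvStep f A B st C = pvCombine A B st (some (C, f C))
        unfold pvStep pvCombine
        rfl
      · rw [pvBestOf_cons_some f C rest c e hrest]
        show pvCombine A B (pvStep f A B st C) (some (c, e)) = _
        by_cases hle : f C ≤ e
        · rw [if_pos hle]
          show _ = pvCombine A B st (some (C, f C))
          by_cases h1 : pvLt (f C) st = true
          · have hupd : pvStep f A B st C = some (A, B, C, f C) := by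
              unfold pvStep; rw [if_pos h1]
            have h2 : pvLt e (some (A, B, C, f C)) = false := by
              unfold pvLt; simp; omega
            show (if pvLt e (pvStep f A B st C) then some (A, B, c, e) else pvStep f A B st C) = _
            rw [hupd, h2]
            show some (A, B, C, f C) = (if pvLt (f C) st then some (A, B, C, f C) else st)
            rw [if_pos h1]
          · have hkeep : pvStep f A B st C = st := by unfold pvStep; rw [if_neg h1]
            have h2 : pvLt e st = false := by
              unfold pvLt at *
              rcases st with _ | ⟨a', b', c', me⟩
              · simp at h1
              · simp at h1 ⊢; omega
            show (if pvLt e (pvStep f A B st C) then some (A, B, c, e) else pvStep f A B st C) = _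
            rw [hkeep, h2]
            show st = (if pvLt (f C) st then some (A, B, C, f C) else st)
            rw [if_neg h1]
        · rw [if_neg hle]
          show _ = pvCombine A B st (some (c, e))
          by_cases h1 : pvLt (f C) st = true
          · have hupd : pvStep f A B st C = some (A, B, C, f C) := by
              unfold pvStep; rw [if_pos h1]
            have h2 : pvLt e (some (A, B, C, f C)) = true := by
              unfold pvLt; simp; omega
            have h3 : pvLt e st = true := by
              unfold pvLt at *
              rcases st with _ | ⟨a', b', c', me⟩
              · rfl
              · simp at h1 ⊢; omega
            show (if pvLt e (pvStep f A B st C) then some (A, B, c, e) else pvStep f A B st C) = _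
            rw [hupd, h2]
            show some (A, B, c, e) = (if pvLt e st then some (A, B, c, e) else st)
            rw [h3]
            simp
          · have hkeep : pvStep f A B st C = st := by unfold pvStep; rw [if_neg h1]
            show (if pvLt e (pvStep f A B st C) then some (A, B, c, e) else pvStep f A B st C) = _
            rw [hkeep]
            rfl

lemma pvBestOf_eq_of_min (f : Int → Int) (c : Int) :
    ∀ cs : List Int, cs.Pairwise (· < ·) → c ∈ cs →
      (∀ x ∈ cs, f c ≤ f x) → (∀ x ∈ cs, x < c → f c < f x) →
      pvBestOf f cs = some (c, f c) := by
  intro cs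
  induction cs with
  | nil => intro _ h; simp at h
  | cons C rest ih =>
      intro hpw hmem hmin hfirst
      rcases List.mem_cons.mp hmem with hc | hc
      · subst hc
        rcases hrest : pvBestOf f rest with _ | ⟨c', e'⟩
        · exact pvBestOf_cons_none f c rest hrest
        · obtain ⟨hm', he'⟩ := pvBestOf_mem f rest c' e' hrest
          have hle : f c ≤ e' := he' ▸ hmin c' (List.mem_cons_of_mem _ hm')
          rw [pvBestOf_cons_some f c rest c' e' hrest, if_pos hle]
      · have hCc : C < c := (List.pairwise_cons.mp hpw).1 c hc
        have htail := ih (List.pairwise_cons.mp hpw).2 hc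
            (fun x hx => hmin x (List.mem_cons_of_mem _ hx))
            (fun x hx => hfirst x (List.mem_cons_of_mem _ hx))
        have hgt : ¬ f C ≤ f c := by
          have := hfirst C List.mem_cons_self hCc
          omega
        rw [pvBestOf_cons_some f C rest c (f c) htail, if_neg hgt]

-- V-shape: pvBestC picks the first argmin of |m*x - d| over [0, 255]
lemma pvBestC_min (d m : Int) (hm : 0 < m) :
    (0 ≤ pvBestC d m ∧ pvBestC d m < 256) ∧
    (∀ x : Int, 0 ≤ x → x < 256 → |m * pvBestC d m - d| ≤ |m * x - d|) ∧
    (∀ x : Int, 0 ≤ x → x < 256 → x < pvBestC d m → |m * pvBestC d m - d| < |m * x - d|) := by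
  set q := PySem.Int.floordiv d m with hq
  have hqb : q * m ≤ d ∧ d < (q + 1) * m := by
    rw [hq]
    exact (PySem.Int.floordiv_eq_iff_of_pos hm).mp rfl
  have flo : ∀ x : Int, x ≤ q → |m * x - d| = d - m * x := by
    intro x hx
    have h1 : m * x ≤ m * q := by nlinarith
    have : m * x - d ≤ 0 := by nlinarith
    rw [abs_of_nonpos this]; ring
  have fhi : ∀ x : Int, q + 1 ≤ x → |m * x - d| = m * x - d := by
    intro x hx
    have h1 : m * (q + 1) ≤ m * x := by nlinarith
    have : 0 ≤ m * x - d := by nlinarith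
    rw [abs_of_nonneg this]
  unfold pvBestC
  rw [← hq]
  by_cases h0 : q < 0
  · rw [if_pos h0]
    refine ⟨⟨le_refl 0, by norm_num⟩, ?_, ?_⟩
    · intro x hx0 hx
      rw [fhi 0 (by omega), fhi x (by omega)]
      nlinarith
    · intro x hx0 _ hx; omega
  · rw [if_neg h0]
    by_cases h255 : q > 254
    · rw [if_pos h255]
      refine ⟨⟨by norm_num, by norm_num⟩, ?_, ?_⟩
      · intro x hx0 hx
        rw [flo 255 (by omega), flo x (by omega)]
        nlinarith
      · intro x hx0 hx hxc
        rw [flo 255 (by omega), flo x (by omega)]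
        nlinarith
    · rw [if_neg h255]
      by_cases hr : d - m * q ≤ m - (d - m * q)
      · rw [if_pos hr]
        have hfq : |m * q - d| = d - m * q := flo q (le_refl q)
        refine ⟨⟨by omega, by omega⟩, ?_, ?_⟩
        · intro x hx0 hx
          rw [hfq]
          by_cases hxq : x ≤ q
          · rw [flo x hxq]; nlinarith
          · rw [fhi x (by omega)]
            have : m * (q + 1) ≤ m * x := by nlinarith
            nlinarith
        · intro x hx0 hx hxc
          rw [hfq, flo x (by omega)]
          have : m * x ≤ m * (q - 1) := by nlinarith
          nlinarith
      · rw [if_neg hr]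
        have hfq1 : |m * (q + 1) - d| = m * (q + 1) - d := fhi (q + 1) (le_refl _)
        refine ⟨⟨by omega, by omega⟩, ?_, ?_⟩
        · intro x hx0 hx
          rw [hfq1]
          by_cases hxq : x ≤ q
          · rw [flo x hxq]
            have : m * x ≤ m * q := by nlinarith
            nlinarith
          · rw [fhi x (by omega)]
            have : m * (q + 1) ≤ m * x := by nlinarith
            nlinarith
        · intro x hx0 hx hxc
          rw [hfq1, flo x (by omega)]
          have : m * x ≤ m * q := by nlinarith
          nlinarith

-- the inner C-loop of A equals B's O(1) step
lemma pvInner_eq (tc A B : Int) (hA : 0 ≤ A) (hB : 0 ≤ B)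
    (st : Option (Int × Int × Int × Int)) :
    pvALoopC tc A B (PySem.List.pyRange 0 256 1) st = pvBStep (tc - 6) st A B := by
  set m : Int := 3 * (A * B + B + 1) with hmdef
  have hm : 0 < m := by nlinarith
  set f : Int → Int := fun C => |3*A*B*C + 3*B*C + 3*C + 6 - tc| with hfdef
  have hf : ∀ C : Int, f C = |m * C - (tc - 6)| := by
    intro C; rw [hfdef, hmdef]; ring_nf
  obtain ⟨⟨hc0, hc256⟩, hmin, hfirst⟩ := pvBestC_min (tc - 6) m hm
  have hbo : pvBestOf f (PySem.List.pyRange 0 256 1) = some (pvBestC (tc - 6) m, f (pvBestC (tc - 6) m)) := by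
    apply pvBestOf_eq_of_min
    · exact PySem.List.pairwise_lt_pyRange_one 0 256
    · rw [PySem.List.mem_pyRange_one]; exact ⟨hc0, hc256⟩
    · intro x hx
      rw [PySem.List.mem_pyRange_one] at hx
      rw [hf, hf]; exact hmin x hx.1 hx.2
    · intro x hx hxc
      rw [PySem.List.mem_pyRange_one] at hx
      rw [hf, hf]; exact hfirst x hx.1 hx.2 hxc
  rw [pvALoopC_eq_foldl, pvFoldl_step_eq_bestOf f A B, hbo]
  show (if pvLt (f (pvBestC (tc - 6) m)) st then some (A, B, pvBestC (tc - 6) m, f (pvBestC (tc - 6) m)) else st) = _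
  unfold pvBStep pvLt
  rw [← hmdef, hf (pvBestC (tc - 6) m)]

lemma pvFold_eq (tc : Int) : pvAFold tc = pvBFold (tc - 6) := by
  unfold pvAFold pvBFold
  apply PySem.List.foldl_congr_mem
  intro st A hA
  apply PySem.List.foldl_congr_mem
  intro st' B hB
  rw [PySem.List.mem_pyRange_one] at hA hB
  exact pvInner_eq tc A B hA.1 hB.1 st'

-- ===== VERDICT (by name: the statement is the Claim_ definition above) =====
theorem find_best_abc_spec : Claim_equal_find_best_abc := by
  intro tc _
  show find_best_abc tc = find_best_abc_alt tc
  unfold find_best_abc find_best_abc_alt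
  rw [pvFold_eq tc]
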